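-- pv_equiv track=rewrite | github.com/ai-dynamo/dynamo | tests/utils/resource_monitor.py | _parse_meminfo
-- ===== SOURCE A (Python) =====
-- def _parse_meminfo(meminfo_output: str) -> dict:
--     """Parse /proc/meminfo output.
--
--     Args:
--         meminfo_output: Raw output from cat /proc/meminfo
--
--     Returns:
--         dict with 'total', 'available', 'used' keys (all in bytes)
--     """
--     values = {}
--     for line in meminfo_output.strip().split("\n"):
--         parts = line.split()
--         if len(parts) >= 2:
--             key = parts[0].rstrip(":")
--             # Values are in kB, convert to bytes
--             value = int(parts[1]) * 1024
--             values[key] = value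
--
--     return {
--         "total": values.get("MemTotal", 0),
--         "available": values.get("MemAvailable", 0),
--         "used": values.get("MemTotal", 0) - values.get("MemAvailable", 0),
--     }
-- ===== SOURCE B (Python) =====
-- def _parse_meminfo(meminfo_output: str) -> dict:
--     """Parse /proc/meminfo output.
--
--     Single reverse scan tracking only the two relevant keys (first hit in
--     reverse = last-wins), instead of building a dict of every line.
--     """
--     total = None
--     available = None
--     for line in reversed(meminfo_output.strip().split("\n")):
--         if total is not None and available is not None:
--             break
--         parts = line.split()
--         if len(parts) < 2:
--             continue
--         key = parts[0].rstrip(":")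
--         if total is None and key == "MemTotal":
--             total = int(parts[1]) * 1024
--         elif available is None and key == "MemAvailable":
--             available = int(parts[1]) * 1024
--     if total is None:
--         total = 0
--     if available is None:
--         available = 0
--     return {"total": total, "available": available, "used": total - available}
-- ===== Notes on version B (the rewrite author's own statement) =====
-- stated objective: alternative
-- what changed: Replaces A's dict built from every line plus three lookups with a single reverse scan that tracks only MemTotal and MemAvailable (first hit in reverse = dict last-wins) and breaks as soon as both are found; no dict and no int-parsing of irrelevant lines.
import Mathlib
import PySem

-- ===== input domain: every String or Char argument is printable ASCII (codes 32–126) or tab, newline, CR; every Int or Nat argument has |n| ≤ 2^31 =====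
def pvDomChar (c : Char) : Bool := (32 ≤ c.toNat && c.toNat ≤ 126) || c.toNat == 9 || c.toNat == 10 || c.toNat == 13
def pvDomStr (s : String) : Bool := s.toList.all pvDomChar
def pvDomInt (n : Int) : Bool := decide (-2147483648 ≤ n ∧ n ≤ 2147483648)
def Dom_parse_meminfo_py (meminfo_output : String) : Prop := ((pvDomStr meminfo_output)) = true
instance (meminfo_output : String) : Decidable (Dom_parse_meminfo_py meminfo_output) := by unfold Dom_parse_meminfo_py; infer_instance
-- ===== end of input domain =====

-- B replaces A's dict-of-every-line with one reverse scan tracking only the two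
-- relevant keys (first hit in reverse = dict last-wins), stopping once both are found.

-- ===== PORT A =====
-- s.rstrip(":"): PySem has no one-sided strip-with-chars, hand port (exact: drop trailing ':' chars)
def pvRstripColon (cs : List Char) : List Char :=
  (cs.reverse.dropWhile (fun c => c == ':')).reverse

-- body of A's 'for line in …' loop: values[key] = int(parts[1]) * 1024 when len(parts) >= 2
def pvAStep (d : PySem.Dict String Int) (line : String) : PySem.Dict String Int :=
  let parts := PySem.Str.split₀ line
  if 2 ≤ parts.length then
    let key := String.ofList (pvRstripColon (parts.getD 0 "").toList)
    let value := (PySem.Int.ofStr? (parts.getD 1 "")).getD 0 * 1024  -- exact under Pre_ (int() succeeds)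
    d.insert key value
  else d

def parse_meminfo_py (meminfo_output : String) : List (String × Int) :=
  let lines := (PySem.Str.split? (PySem.Str.strip meminfo_output) "\n").getD []
  let values := lines.foldl pvAStep PySem.Dict.empty
  [("total", values.getD "MemTotal" 0),
   ("available", values.getD "MemAvailable" 0),
   ("used", values.getD "MemTotal" 0 - values.getD "MemAvailable" 0)]

-- ===== PORT B =====
-- B's reversed loop with early break; t/a are Python's 'total'/'available' (None = not yet seen)
def pvBLoop : List String → Option Int → Option Int → Option Int × Option Int
  | [], t, a => (t, a)
  | line :: rest, t, a =>
    if t.isSome && a.isSome then (t, a)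
    else
      let parts := PySem.Str.split₀ line
      if parts.length < 2 then pvBLoop rest t a
      else
        let key := String.ofList (pvRstripColon (parts.getD 0 "").toList)
        if t.isNone && (key == "MemTotal") then
          pvBLoop rest (some ((PySem.Int.ofStr? (parts.getD 1 "")).getD 0 * 1024)) a
        else if a.isNone && (key == "MemAvailable") then
          pvBLoop rest t (some ((PySem.Int.ofStr? (parts.getD 1 "")).getD 0 * 1024))
        else pvBLoop rest t a

def parse_meminfo_py_alt (meminfo_output : String) : List (String × Int) :=
  let lines := (PySem.Str.split? (PySem.Str.strip meminfo_output) "\n").getD []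
  let r := pvBLoop lines.reverse none none
  let total := r.1.getD 0
  let available := r.2.getD 0
  [("total", total), ("available", available), ("used", total - available)]

-- ===== PRECONDITION & SPEC =====
-- Pre_ excludes exactly the inputs where A raises ValueError: a line with >= 2
-- whitespace-separated tokens whose second token is not a valid Python int literal.
def Pre_parse_meminfo_py (meminfo_output : String) : Prop :=
  (((PySem.Str.split? (PySem.Str.strip meminfo_output) "\n").getD []).all
    (fun line =>
      let parts := PySem.Str.split₀ line
      decide (2 ≤ parts.length) → (PySem.Int.ofStr? (parts.getD 1 "")).isSome)) = true
instance (meminfo_output : String) : Decidable (Pre_parse_meminfo_py meminfo_output) := by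
  unfold Pre_parse_meminfo_py; infer_instance

def pvWitness_parse_meminfo_py : String :=
  "MemTotal:       4096 kB\nMemFree:        1024 kB\nMemAvailable:   2048 kB"

def Spec_parse_meminfo_py (meminfo_output : String) (out : List (String × Int)) : Prop := out = parse_meminfo_py_alt meminfo_output
instance (meminfo_output : String) (out : List (String × Int)) : Decidable (Spec_parse_meminfo_py meminfo_output out) := by unfold Spec_parse_meminfo_py; infer_instance

-- ===== CLAIM (what is proved, stated in full; the proofs are below) =====
def Claim_equal_parse_meminfo_py : Prop := ∀ (meminfo_output : String), Dom_parse_meminfo_py meminfo_output → Pre_parse_meminfo_py meminfo_output → Spec_parse_meminfo_py meminfo_output (parse_meminfo_py meminfo_output)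

-- ===== LEMMAS AND PROOFS =====

-- what one line contributes: (key, value) when len(parts) >= 2, else nothing
def pvEntry (line : String) : Option (String × Int) :=
  let parts := PySem.Str.split₀ line
  if 2 ≤ parts.length then
    some (String.ofList (pvRstripColon (parts.getD 0 "").toList),
          (PySem.Int.ofStr? (parts.getD 1 "")).getD 0 * 1024)
  else none

-- value of the first line (in scan order) contributing key k
def pvFind (k : String) : List String → Option Int
  | [] => none
  | line :: rest =>
    match pvEntry line with
    | some (k', v) => if k' = k then some v else pvFind k rest
    | none => pvFind k rest

def pvOr (t x : Option Int) : Option Int :=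
  match t with
  | some v => some v
  | none => x

theorem pvAStep_eq (d : PySem.Dict String Int) (line : String) :
    pvAStep d line = match pvEntry line with
      | some (k, v) => d.insert k v
      | none => d := by
  unfold pvAStep pvEntry
  by_cases h : 2 ≤ (PySem.Str.split₀ line).length <;> simp [h]

theorem pvFind_append (k : String) (xs ys : List String) :
    pvFind k (xs ++ ys) = pvOr (pvFind k xs) (pvFind k ys) := by
  induction xs with
  | nil => simp [pvFind, pvOr]
  | cons x xs ih =>
    simp only [List.cons_append, pvFind]
    cases h : pvEntry x with
    | none => simpa [h] using ih
    | some p =>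
      by_cases hk : p.1 = k
      · simp [hk, pvOr]
      · simpa [h, hk] using ih

-- A's dict lookup = first match in the reversed line list
theorem pvDict_getD (L : List String) (d : PySem.Dict String Int) (k : String) :
    (L.foldl pvAStep d).getD k 0 =
      match pvFind k L.reverse with
      | some v => v
      | none => d.getD k 0 := by
  induction L generalizing d with
  | nil => simp [pvFind]
  | cons line rest ih =>
    simp only [List.foldl_cons, List.reverse_cons]
    rw [ih, pvFind_append]
    cases hr : pvFind k rest.reverse with
    | some v => simp [pvOr]
    | none =>
      simp only [pvOr]
      rw [pvAStep_eq]
      cases he : pvEntry line with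
      | none => simp [pvFind, he]
      | some p =>
        by_cases hk : p.1 = k
        · simp [pvFind, he, hk]
        · simp [pvFind, he, hk, PySem.Dict.getD_insert, Ne.symm hk]

-- B's loop computes: keep what is already found, else the first match in scan order
theorem pvBLoop_spec (M : List String) (t a : Option Int) :
    pvBLoop M t a = (pvOr t (pvFind "MemTotal" M), pvOr a (pvFind "MemAvailable" M)) := by
  induction M generalizing t a with
  | nil => cases t <;> cases a <;> simp [pvBLoop, pvFind, pvOr]
  | cons line rest ih =>
    rw [pvBLoop]
    by_cases hta : t.isSome && a.isSome
    · obtain ⟨u, rfl⟩ := Option.isSome_iff_exists.mp (Bool.and_elim_left hta)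
      obtain ⟨w, rfl⟩ := Option.isSome_iff_exists.mp (Bool.and_elim_right hta)
      simp [pvOr]
    · simp only [hta]
      by_cases hlen : (PySem.Str.split₀ line).length < 2
      · have he : pvEntry line = none := by unfold pvEntry; simp [Nat.not_le.mpr hlen]
        simp [hlen, ih, pvFind, he]
      · have hlen' : 2 ≤ (PySem.Str.split₀ line).length := Nat.not_lt.mp hlen
        set key := String.ofList (pvRstripColon ((PySem.Str.split₀ line).getD 0 "").toList) with hkey
        set val := (PySem.Int.ofStr? ((PySem.Str.split₀ line).getD 1 "")).getD 0 * 1024 with hval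
        have he : pvEntry line = some (key, val) := by unfold pvEntry; simp [hlen', hkey, hval]
        simp only [hlen, if_false]
        by_cases h1 : t.isNone && (key == "MemTotal")
        · have ht : t = none := Option.isNone_iff_eq_none.mp (Bool.and_elim_left h1)
          have hk : key = "MemTotal" := by
            have := Bool.and_elim_right h1; exact eq_of_beq this
          have hk2 : key ≠ "MemAvailable" := by rw [hk]; decide
          simp only [ih, pvFind, he, ht, hk]
          simp [pvOr]
        · simp only [h1]
          by_cases h2 : a.isNone && (key == "MemAvailable")
          · have ha : a = none := Option.isNone_iff_eq_none.mp (Bool.and_elim_left h2)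
            have hk : key = "MemAvailable" := eq_of_beq (Bool.and_elim_right h2)
            have hk2 : key ≠ "MemTotal" := by rw [hk]; decide
            simp only [ih, pvFind, he, ha, hk]
            simp [pvOr]
          · -- neither branch fires: either the key is irrelevant, or it is already recorded
            simp only [h2, ih, pvFind, he]
            by_cases hkT : key = "MemTotal"
            · -- then t must be some (else h1 would hold)
              have ht : t.isNone = false := by
                cases ht : t.isNone
                · rfl
                · exact absurd (by simp [ht, hkT]) h1
              obtain ⟨u, rfl⟩ := Option.isSome_iff_exists.mp (by simp_all [Option.isNone_eq_false_iff] : t.isSome)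
              have hk2 : key ≠ "MemAvailable" := by rw [hkT]; decide
              simp [pvOr, hkT]
            · by_cases hkA : key = "MemAvailable"
              · have ha : a.isNone = false := by
                  cases ha : a.isNone
                  · rfl
                  · exact absurd (by simp [ha, hkA]) h2
                obtain ⟨w, rfl⟩ := Option.isSome_iff_exists.mp (by simp_all [Option.isNone_eq_false_iff] : a.isSome)
                simp [pvOr, hkA]
              · simp [pvOr, hkT, hkA]

-- ===== VERDICT (by name: the statement is the Claim_ definition above) =====
theorem parse_meminfo_py_spec : Claim_equal_parse_meminfo_py := by
  intro s _hdom _hpre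
  unfold Spec_parse_meminfo_py parse_meminfo_py parse_meminfo_py_alt
  simp only [pvBLoop_spec, pvDict_getD, PySem.Dict.getD_empty]
  cases pvFind "MemTotal" ((PySem.Str.split? (PySem.Str.strip s) "\n").getD []).reverse <;>
    cases pvFind "MemAvailable" ((PySem.Str.split? (PySem.Str.strip s) "\n").getD []).reverse <;>
      simp [pvOr]
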